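-- pv_equiv track=rewrite | github.com/JoshBradshaw/AOC2020 | src/day11/main.py | part2
-- ===== SOURCE A (Python) =====
-- from copy import deepcopy
--
-- def part2(seat_grid):
--     num_rows, num_cols = len(seat_grid), len(seat_grid[0])
--     directions = [(rd, cd) for rd in range(-1, 2) for cd in range(-1, 2) if abs(rd) + abs(cd) != 0]
--     num_changes = 1
--
--     while num_changes > 0:
--         new_grid = deepcopy(seat_grid)
--         num_changes = 0
--         for row in range(num_rows):
--             for col in range(num_cols):
--                 if not seat_grid[row][col] in '#L':
--                     continue
--
--                 visible_occupied = 0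
--                 for rd, cd in directions:
--                     found = False
--                     vr, vc = row + rd, col + cd
--                     while -1 < vr < num_rows and -1 < vc < num_cols and not found:
--                         if seat_grid[vr][vc] == 'L':
--                             found = True
--                         if seat_grid[vr][vc] == '#':
--                             visible_occupied += 1
--                             found = True
--
--                         vr += rd
--                         vc += cd
--
--                 if seat_grid[row][col] == 'L' and visible_occupied == 0:
--                     new_grid[row][col] = '#'
--                     num_changes += 1
--                 if seat_grid[row][col] == '#' and visible_occupied >= 5:
--                     new_grid[row][col] = 'L'
--                     num_changes += 1
--         seat_grid = new_grid
--     return sum(row.count('#') for row in seat_grid)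
-- ===== SOURCE B (Python) =====
-- def part2(seat_grid):
--     # Precompute each seat's line-of-sight neighbors once, then iterate over fixed
--     # neighbor lists until the grid is stable.
--     num_rows, num_cols = len(seat_grid), len(seat_grid[0])
--     dirs = [(-1, -1), (-1, 0), (-1, 1), (0, -1), (0, 1), (1, -1), (1, 0), (1, 1)]
--
--     def first_seat(r, c, rd, cd):
--         vr, vc = r + rd, c + cd
--         while 0 <= vr < num_rows and 0 <= vc < num_cols:
--             if seat_grid[vr][vc] in ('L', '#'):
--                 return (vr, vc)
--             vr, vc = vr + rd, vc + cd
--         return None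
--
--     seats = []
--     for r in range(num_rows):
--         for c in range(num_cols):
--             if seat_grid[r][c] in ('L', '#'):
--                 ns = [p for p in (first_seat(r, c, rd, cd) for rd, cd in dirs)
--                       if p is not None]
--                 seats.append((r, c, ns))
--
--     grid = seat_grid
--     while True:
--         new = [row[:] for row in grid]
--         changed = False
--         for r, c, ns in seats:
--             occ = 0
--             for vr, vc in ns:
--                 if grid[vr][vc] == '#':
--                     occ += 1
--             if grid[r][c] == 'L':
--                 if occ == 0:
--                     new[r][c] = '#'
--                     changed = True
--             elif occ >= 5:
--                 new[r][c] = 'L'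
--                 changed = True
--         if not changed:
--             return sum(row.count('#') for row in new)
--         grid = new
-- ===== Notes on version B (the rewrite author's own statement) =====
-- stated objective: faster
-- what changed: B precomputes each seat's eight line-of-sight neighbor coordinates once up front, so every iteration of the automaton only counts occupied cells at fixed positions instead of re-scanning rays across the grid.
import Mathlib
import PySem

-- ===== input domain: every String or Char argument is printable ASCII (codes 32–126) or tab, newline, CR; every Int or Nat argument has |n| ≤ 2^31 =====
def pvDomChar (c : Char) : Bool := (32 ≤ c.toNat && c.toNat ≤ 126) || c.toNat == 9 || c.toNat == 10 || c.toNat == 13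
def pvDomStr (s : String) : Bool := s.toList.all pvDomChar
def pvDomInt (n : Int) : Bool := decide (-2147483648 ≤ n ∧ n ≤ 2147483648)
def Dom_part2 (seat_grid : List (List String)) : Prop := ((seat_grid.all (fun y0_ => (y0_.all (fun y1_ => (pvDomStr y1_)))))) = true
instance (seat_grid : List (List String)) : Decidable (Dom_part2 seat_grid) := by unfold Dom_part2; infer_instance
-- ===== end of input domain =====

-- B precomputes each seat's line-of-sight neighbor coordinates once, so every iteration only
-- counts occupied cells at fixed positions instead of re-scanning rays across the grid (faster).
-- Return-value equivalence only; neither program mutates its argument observably.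

-- Shared indexing helpers: every grid read/write in both programs happens under 0 ≤ i < len
-- guards (and Pre_ gives every column index < row length), where these equal Python indexing.
def cellNat (g : List (List String)) (i j : Nat) : String := (g.getD i []).getD j ""
def cell (g : List (List String)) (r c : Int) : String := cellNat g r.toNat c.toNat
def setCell (g : List (List String)) (r c : Int) (v : String) : List (List String) :=
  g.set r.toNat ((g.getD r.toNat []).set c.toNat v)

-- ===== PORT A =====
-- directions = [(rd, cd) for rd in range(-1, 2) for cd in range(-1, 2) if abs(rd) + abs(cd) != 0]
def part2Dirs : List (Int × Int) :=
  (PySem.List.pyRange (-1) 2 1).flatMap fun rd =>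
    (PySem.List.pyRange (-1) 2 1).filterMap fun cd =>
      if rd.natAbs + cd.natAbs ≠ 0 then some (rd, cd) else none

-- the inner 'while -1 < vr < num_rows and -1 < vc < num_cols and not found' scan;
-- fuel is a totality guard only (the walk leaves the grid after ≤ numRows+numCols+1 steps)
def scanA (g : List (List String)) (numRows numCols rd cd : Int) :
    Nat → Int → Int → Bool → Int → Int
  | 0, _, _, _, acc => acc
  | fuel+1, vr, vc, found, acc =>
    if ((-1 < vr && vr < numRows) && (-1 < vc && vc < numCols)) && !found then
      let found1 := if cell g vr vc == "L" then true else found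
      let acc1 := if cell g vr vc == "#" then acc + 1 else acc
      let found2 := if cell g vr vc == "#" then true else found1
      scanA g numRows numCols rd cd fuel (vr + rd) (vc + cd) found2 acc1
    else acc

def visOccA (g : List (List String)) (nr nc r c : Int) : Int :=
  part2Dirs.foldl (fun acc d =>
    scanA g nr nc d.1 d.2 ((nr + nc).toNat + 2) (r + d.1) (c + d.2) false acc) 0

-- one pass of the 'for row … for col …' body; state = (new_grid, num_changes)
def stepA (nr nc : Int) (g : List (List String)) : List (List String) × Int :=
  (PySem.List.pyRange 0 nr 1).foldl (fun st row =>
    (PySem.List.pyRange 0 nc 1).foldl (fun st col =>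
      if !(PySem.Str.isIn (cell g row col) "#L") then st
      else
        let vis := visOccA g nr nc row col
        let st1 := if cell g row col == "L" && vis == 0 then (setCell st.1 row col "#", st.2 + 1) else st
        if cell g row col == "#" && decide (5 ≤ vis) then (setCell st1.1 row col "L", st1.2 + 1) else st1)
      st) (g, 0)

-- 'while num_changes > 0'; fuel is a totality guard only
def loopA (nr nc : Int) : Nat → List (List String) → List (List String)
  | 0, g => g
  | fuel+1, g =>
    let st := stepA nr nc g
    if 0 < st.2 then loopA nr nc fuel st.1 else st.1

def part2 (seat_grid : List (List String)) : Int :=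
  let numRows : Int := seat_grid.length
  let numCols : Int := ((seat_grid.headD []).length : Int)  -- seat_grid[0]: Pre_ excludes the empty grid, where Python raises
  let final := loopA numRows numCols (2 ^ (seat_grid.length * (seat_grid.headD []).length) + 1) seat_grid
  (final.map (fun row => ((PySem.List.count row "#" : Nat) : Int))).sum

-- ===== PORT B =====
def dirsB : List (Int × Int) := [(-1,-1),(-1,0),(-1,1),(0,-1),(0,1),(1,-1),(1,0),(1,1)]

def isSeatB (s : String) : Bool := s == "L" || s == "#"

-- first_seat(r, c, rd, cd); fuel is a totality guard only, as in scanA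
def firstSeatB (g : List (List String)) (nr nc rd cd : Int) :
    Nat → Int → Int → Option (Int × Int)
  | 0, _, _ => none
  | fuel+1, vr, vc =>
    if (0 ≤ vr && vr < nr) && (0 ≤ vc && vc < nc) then
      if isSeatB (cell g vr vc) then some (vr, vc)
      else firstSeatB g nr nc rd cd fuel (vr + rd) (vc + cd)
    else none

def seatsB (g : List (List String)) (nr nc : Int) : List (Int × Int × List (Int × Int)) :=
  (PySem.List.pyRange 0 nr 1).flatMap fun r =>
    (PySem.List.pyRange 0 nc 1).filterMap fun c =>
      if isSeatB (cell g r c) then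
        some (r, c, dirsB.filterMap fun d =>
          firstSeatB g nr nc d.1 d.2 ((nr + nc).toNat + 2) (r + d.1) (c + d.2))
      else none

-- one pass over the fixed seat list; state = (new_grid, changed)
def stepB (g : List (List String)) (seats : List (Int × Int × List (Int × Int))) :
    List (List String) × Bool :=
  seats.foldl (fun st s =>
    let occ : Int := s.2.2.foldl (fun occ p => if cell g p.1 p.2 == "#" then occ + 1 else occ) 0
    if cell g s.1 s.2.1 == "L" then
      if occ == 0 then (setCell st.1 s.1 s.2.1 "#", true) else st
    else if decide (5 ≤ occ) then (setCell st.1 s.1 s.2.1 "L", true) else st) (g, false)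

def loopB (seats : List (Int × Int × List (Int × Int))) :
    Nat → List (List String) → List (List String)
  | 0, g => g
  | fuel+1, g =>
    let st := stepB g seats
    if st.2 then loopB seats fuel st.1 else st.1

def part2_alt (seat_grid : List (List String)) : Int :=
  let nr : Int := seat_grid.length
  let nc : Int := ((seat_grid.headD []).length : Int)
  let seats := seatsB seat_grid nr nc
  let final := loopB seats (2 ^ (seat_grid.length * (seat_grid.headD []).length) + 1) seat_grid
  (final.map (fun row => ((PySem.List.count row "#" : Nat) : Int))).sum

-- ===== PRECONDITION & SPEC =====
-- Pre_ excludes exactly the inputs where the Python A raises IndexError: the empty grid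
-- (seat_grid[0]) and grids with a row shorter than the first row (read at every col < num_cols).
def Pre_part2 (seat_grid : List (List String)) : Prop :=
  seat_grid ≠ [] ∧ ∀ row ∈ seat_grid, (seat_grid.headD []).length ≤ row.length
instance (seat_grid : List (List String)) : Decidable (Pre_part2 seat_grid) := by
  unfold Pre_part2; infer_instance

def pvWitness_part2 : List (List String) := [["L", "."], [".", "L"], ["#", ""]]

def Spec_part2 (seat_grid : List (List String)) (out : Int) : Prop := out = part2_alt seat_grid
instance (seat_grid : List (List String)) (out : Int) : Decidable (Spec_part2 seat_grid out) := by
  unfold Spec_part2; infer_instance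

-- ===== CLAIM (what is proved, stated in full; the proofs are below) =====
def Claim_equal_part2 : Prop := ∀ (seat_grid : List (List String)), Dom_part2 seat_grid → Pre_part2 seat_grid → Spec_part2 seat_grid (part2 seat_grid)

-- ===== LEMMAS AND PROOFS =====

-- support: which cells hold a seat ('L' or '#'); invariant along the whole run
def Supp (g0 g : List (List String)) : Prop :=
  ∀ i j : Nat, isSeatB (cellNat g i j) = isSeatB (cellNat g0 i j)

theorem part2Dirs_eq : part2Dirs = dirsB := by decide

theorem getD_set' {α : Type} (l : List α) (i j : Nat) (a d : α) :
    (l.set i a).getD j d = if i = j ∧ i < l.length then a else l.getD j d := by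
  simp only [List.getD_eq_getElem?_getD, List.getElem?_set]
  by_cases h1 : i = j <;> by_cases h2 : i < l.length
  · subst h1; simp [h2]
  · subst h1; simp [h2]
  · simp [h1]
  · simp [h1]

theorem cellNat_setCell (g : List (List String)) (r c : Int) (v : String) (i j : Nat) :
    cellNat (setCell g r c v) i j =
      if r.toNat = i ∧ c.toNat = j ∧ r.toNat < g.length ∧ c.toNat < (g.getD r.toNat []).length
      then v else cellNat g i j := by
  unfold cellNat setCell
  rw [getD_set']
  by_cases h1 : r.toNat = i ∧ r.toNat < g.length
  · rw [if_pos h1, getD_set']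
    by_cases h2 : c.toNat = j ∧ c.toNat < (g.getD r.toNat []).length
    · rw [if_pos h2, if_pos ⟨h1.1, h2.1, h1.2, h2.2⟩]
    · rw [if_neg h2, if_neg (by tauto), h1.1]
  · rw [if_neg h1, if_neg (by tauto)]

-- the per-cell body of stepA / stepB, named for the fold lemmas
def bodyA (g : List (List String)) (nr nc : Int) (st : List (List String) × Int)
    (x : Int × Int) : List (List String) × Int :=
  if !(PySem.Str.isIn (cell g x.1 x.2) "#L") then st
  else
    let vis := visOccA g nr nc x.1 x.2
    let st1 := if cell g x.1 x.2 == "L" && vis == 0 then (setCell st.1 x.1 x.2 "#", st.2 + 1) else st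
    if cell g x.1 x.2 == "#" && decide (5 ≤ vis) then (setCell st1.1 x.1 x.2 "L", st1.2 + 1) else st1

def bodyB (g : List (List String)) (st : List (List String) × Bool)
    (s : Int × Int × List (Int × Int)) : List (List String) × Bool :=
  let occ : Int := s.2.2.foldl (fun occ p => if cell g p.1 p.2 == "#" then occ + 1 else occ) 0
  if cell g s.1 s.2.1 == "L" then
    if occ == 0 then (setCell st.1 s.1 s.2.1 "#", true) else st
  else if decide (5 ≤ occ) then (setCell st.1 s.1 s.2.1 "L", true) else st

def allCells (nr nc : Int) : List (Int × Int) :=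
  (PySem.List.pyRange 0 nr 1).flatMap fun r => (PySem.List.pyRange 0 nc 1).map fun c => (r, c)

def nbr (g0 : List (List String)) (nr nc r c : Int) : List (Int × Int) :=
  dirsB.filterMap fun d => firstSeatB g0 nr nc d.1 d.2 ((nr + nc).toNat + 2) (r + d.1) (c + d.2)

theorem stepA_eq_cells (g : List (List String)) (nr nc : Int) :
    stepA nr nc g = (allCells nr nc).foldl (bodyA g nr nc) (g, 0) := by
  unfold stepA allCells
  rw [List.foldl_flatMap]
  simp only [List.foldl_map]
  rfl

theorem stepB_eq_fold (g : List (List String)) (seats : List (Int × Int × List (Int × Int))) :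
    stepB g seats = seats.foldl (bodyB g) (g, false) := rfl

theorem seatsB_eq_cells (g0 : List (List String)) (nr nc : Int) :
    seatsB g0 nr nc = (allCells nr nc).filterMap
      (fun x => if isSeatB (cell g0 x.1 x.2) then some (x.1, x.2, nbr g0 nr nc x.1 x.2) else none) := by
  unfold seatsB allCells nbr
  rw [List.filterMap_flatMap]
  simp only [List.filterMap_map, Function.comp]

-- the scan of A with the found flag already set only carries its accumulator out
theorem scanA_found (g : List (List String)) (nr nc rd cd : Int) :
    ∀ (fuel : Nat) (vr vc : Int) (acc : Int),
      scanA g nr nc rd cd fuel vr vc true acc = acc := by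
  intro fuel
  induction fuel with
  | zero => intro vr vc acc; simp [scanA]
  | succ n ih => intro vr vc acc; simp [scanA]

def occInd (g : List (List String)) : Option (Int × Int) → Int
  | some p => if cell g p.1 p.2 == "#" then 1 else 0
  | none => 0

theorem isSeatB_cases (s : String) (h : isSeatB s = true) : s = "L" ∨ s = "#" := by
  unfold isSeatB at h
  rcases Bool.or_eq_true_iff.mp h with h | h
  · exact Or.inl (by simpa using h)
  · exact Or.inr (by simpa using h)

theorem isSeatB_false (s : String) (h : isSeatB s = false) :
    (s == "L") = false ∧ (s == "#") = false := by
  unfold isSeatB at h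
  exact ⟨by revert h; cases hb : (s == "L") <;> simp, by revert h; cases hb : (s == "#") <;> simp⟩

-- lockstep: A's directional scan on the current grid g returns what the precomputed
-- first-seat (computed on g0, same seat support) predicts
theorem scan_firstSeat (g0 g : List (List String)) (hs : Supp g0 g) (nr nc rd cd : Int) :
    ∀ (fuel : Nat) (vr vc : Int) (acc : Int),
      scanA g nr nc rd cd fuel vr vc false acc
        = acc + occInd g (firstSeatB g0 nr nc rd cd fuel vr vc) := by
  intro fuel
  induction fuel with
  | zero => intro vr vc acc; simp [scanA, firstSeatB, occInd]
  | succ n ih =>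
    intro vr vc acc
    have e1 : decide (-1 < vr) = decide (0 ≤ vr) := decide_eq_decide.mpr (by omega)
    have e2 : decide (-1 < vc) = decide (0 ≤ vc) := decide_eq_decide.mpr (by omega)
    rw [scanA, firstSeatB]
    simp only [Bool.not_false, Bool.and_true, e1, e2]
    have eLL : (("L" : String) == "L") = true := by decide
    have eLH : (("L" : String) == "#") = false := by decide
    have eHL : (("#" : String) == "L") = false := by decide
    have eHH : (("#" : String) == "#") = true := by decide
    by_cases hin : ((decide (0 ≤ vr) && decide (vr < nr)) && (decide (0 ≤ vc) && decide (vc < nc))) = true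
    · rw [if_pos hin, if_pos hin]
      have hsupp : isSeatB (cell g0 vr vc) = isSeatB (cell g vr vc) := (hs _ _).symm
      by_cases hseat : isSeatB (cell g vr vc) = true
      · rw [if_pos (hsupp.trans hseat)]
        rcases isSeatB_cases _ hseat with hceq | hceq
        · simp only [hceq, eLL, eLH, Bool.false_eq_true, if_true, if_false]
          rw [scanA_found]
          simp [occInd, hceq, eLH]
        · simp only [hceq, eHL, eHH, Bool.false_eq_true, if_true, if_false]
          rw [scanA_found]
          simp [occInd, hceq]
      · have hgf : isSeatB (cell g vr vc) = false := by simpa using hseat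
        have hseat0 : isSeatB (cell g0 vr vc) = false := hsupp.trans hgf
        obtain ⟨hL, hH⟩ := isSeatB_false _ hgf
        simp only [hL, hH, hseat0, Bool.false_eq_true, if_false]
        exact ih (vr + rd) (vc + cd) acc
    · rw [if_neg hin, if_neg hin]
      simp [occInd]

-- B's occupancy fold is a sum of indicators
theorem occ_fold_eq_sum (g : List (List String)) :
    ∀ (l : List (Int × Int)) (a : Int),
      l.foldl (fun occ p => if cell g p.1 p.2 == "#" then occ + 1 else occ) a
        = a + (l.map (fun p => occInd g (some p))).sum := by
  intro l
  induction l with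
  | nil => intro a; simp
  | cons x l ih =>
    intro a
    simp only [List.foldl_cons, List.map_cons, List.sum_cons]
    rw [ih]
    have hx : occInd g (some x) = if cell g x.1 x.2 == "#" then 1 else 0 := rfl
    rw [hx]
    by_cases hc : (cell g x.1 x.2 == "#") = true
    · simp only [hc, if_true]; ring
    · simp only [Bool.not_eq_true _ ▸ hc, Bool.false_eq_true, if_false]; ring

theorem sum_ind_filterMap (g : List (List String)) (fS : Int × Int → Option (Int × Int)) :
    ∀ (ds : List (Int × Int)),
      (ds.map (fun d => occInd g (fS d))).sum
        = (((ds.filterMap fS).map (fun p => occInd g (some p))).sum) := by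
  intro ds
  induction ds with
  | nil => simp
  | cons d ds ih =>
    simp only [List.map_cons, List.sum_cons, List.filterMap_cons]
    cases h : fS d with
    | none => simpa [occInd, h] using ih
    | some p => simp [ih]

-- A's eight-direction accumulation equals B's count over the precomputed neighbor list
theorem visOcc_eq (g0 g : List (List String)) (hs : Supp g0 g) (nr nc r c : Int) :
    visOccA g nr nc r c
      = (nbr g0 nr nc r c).foldl (fun occ p => if cell g p.1 p.2 == "#" then occ + 1 else occ) 0 := by
  unfold visOccA nbr
  rw [part2Dirs_eq]
  have hfun : (fun (acc : Int) (d : Int × Int) =>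
        scanA g nr nc d.1 d.2 ((nr + nc).toNat + 2) (r + d.1) (c + d.2) false acc)
      = (fun acc d => acc + occInd g
          (firstSeatB g0 nr nc d.1 d.2 ((nr + nc).toNat + 2) (r + d.1) (c + d.2))) := by
    funext acc d
    exact scan_firstSeat g0 g hs nr nc d.1 d.2 _ _ _ acc
  rw [hfun, PySem.List.foldl_add, occ_fold_eq_sum, sum_ind_filterMap]

def StRel (sA : List (List String) × Int) (sB : List (List String) × Bool) : Prop :=
  sA.1 = sB.1 ∧ 0 ≤ sA.2 ∧ (0 < sA.2 ↔ sB.2 = true)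

theorem foldl_filterMap_rel {α β S T : Type} (p : α → Bool) (e : α → β)
    (fA : S → α → S) (fB : T → β → T) (R : S → T → Prop)
    (hid : ∀ s x, p x = false → fA s x = s)
    (hstep : ∀ s t x, p x = true → R s t → R (fA s x) (fB t (e x))) :
    ∀ (L : List α) (s : S) (t : T), R s t →
      R (L.foldl fA s) ((L.filterMap (fun x => if p x then some (e x) else none)).foldl fB t) := by
  intro L
  induction L with
  | nil => intro s t h; simpa using h
  | cons x L ih =>
    intro s t h
    by_cases hp : p x = true
    · simp only [List.foldl_cons, List.filterMap_cons, hp, if_pos, List.foldl_cons]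
      exact ih _ _ (hstep s t x hp h)
    · have hp' : p x = false := by simpa using hp
      simp only [List.foldl_cons, List.filterMap_cons, hp', Bool.false_eq_true, if_false,
        hid s x hp']
      exact ih _ _ h

theorem isSeatB_isIn (s : String) (h : isSeatB s = true) :
    PySem.Str.isIn s "#L" = true := by
  rcases isSeatB_cases _ h with h | h <;> subst h <;> decide

-- one synchronized pass: A's full-grid sweep and B's sweep over the seat list produce the
-- same new grid and agree on whether anything changed
theorem step_eq (g0 g : List (List String)) (hs : Supp g0 g) (nr nc : Int) :
    StRel (stepA nr nc g) (stepB g (seatsB g0 nr nc)) := by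
  rw [stepA_eq_cells, stepB_eq_fold, seatsB_eq_cells]
  refine foldl_filterMap_rel (fun x => isSeatB (cell g0 x.1 x.2))
    (fun x => (x.1, x.2, nbr g0 nr nc x.1 x.2)) (bodyA g nr nc) (bodyB g) StRel ?_ ?_
    (allCells nr nc) (g, 0) (g, false) ⟨rfl, by simp, by simp⟩
  · intro s x hp
    have hp' : isSeatB (cell g x.1 x.2) = false := (hs _ _).trans hp
    obtain ⟨hL, hH⟩ := isSeatB_false _ hp'
    cases hIn : PySem.Str.isIn (cell g x.1 x.2) "#L" <;> simp [bodyA, hL, hH]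
  · intro s t x hp hR
    obtain ⟨hgrid, hnn, hch⟩ := hR
    have hseat : isSeatB (cell g x.1 x.2) = true := (hs _ _).trans hp
    have hIn := isSeatB_isIn _ hseat
    have hocc := visOcc_eq g0 g hs nr nc x.1 x.2
    have eLL : (("L" : String) == "L") = true := by decide
    have eLH : (("L" : String) == "#") = false := by decide
    have eHL : (("#" : String) == "L") = false := by decide
    have eHH : (("#" : String) == "#") = true := by decide
    unfold bodyA bodyB
    simp only [hIn, Bool.not_true, Bool.false_eq_true, if_false, ← hocc]
    rcases isSeatB_cases _ hseat with hceq | hceq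
    · simp only [hceq, eLL, eLH, Bool.true_and, Bool.false_and, Bool.false_eq_true,
        if_true, if_false]
      by_cases h0 : (visOccA g nr nc x.1 x.2 == 0) = true
      · simp only [h0, if_true, hgrid]
        exact ⟨rfl, by omega, by simp; omega⟩
      · simp only [Bool.not_eq_true _ ▸ h0, Bool.false_eq_true, if_false]
        exact ⟨hgrid, hnn, hch⟩
    · simp only [hceq, eHL, eHH, Bool.true_and, Bool.false_and, Bool.false_eq_true, if_false]
      by_cases h5 : 5 ≤ visOccA g nr nc x.1 x.2
      · simp only [h5, decide_true, if_true, hgrid]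
        exact ⟨rfl, by omega, by simp; omega⟩
      · simp only [h5, decide_false, Bool.false_eq_true, if_false]
        exact ⟨hgrid, hnn, hch⟩

theorem supp_setCell (g0 h : List (List String)) (hs : Supp g0 h) (r c : Int) (v : String)
    (hv : isSeatB v = isSeatB (cellNat g0 r.toNat c.toNat)) :
    Supp g0 (setCell h r c v) := by
  intro i j
  rw [cellNat_setCell]
  split
  · next hcond =>
    obtain ⟨h1, h2, _, _⟩ := hcond
    rw [← h1, ← h2]
    exact hv
  · exact hs i j

theorem mem_seatsB (g0 : List (List String)) (nr nc : Int)
    (x : Int × Int × List (Int × Int)) (hx : x ∈ seatsB g0 nr nc) :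
    isSeatB (cell g0 x.1 x.2.1) = true := by
  rw [seatsB_eq_cells] at hx
  rcases List.mem_filterMap.mp hx with ⟨y, _, hy⟩
  by_cases hp : isSeatB (cell g0 y.1 y.2) = true
  · rw [if_pos hp] at hy
    cases hy
    exact hp
  · rw [if_neg hp] at hy
    cases hy

theorem supp_foldl_bodyB (g0 g : List (List String))
    (seats : List (Int × Int × List (Int × Int)))
    (hmem : ∀ x ∈ seats, isSeatB (cellNat g0 x.1.toNat x.2.1.toNat) = true) :
    ∀ st : List (List String) × Bool, Supp g0 st.1 →
      Supp g0 ((seats.foldl (bodyB g) st).1) := by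
  induction seats with
  | nil => intro st h; simpa using h
  | cons x seats ih =>
    intro st h
    simp only [List.foldl_cons]
    refine ih (fun y hy => hmem y (List.mem_cons_of_mem x hy)) _ ?_
    have hx : isSeatB (cellNat g0 x.1.toNat x.2.1.toNat) = true := hmem x List.mem_cons_self
    unfold bodyB
    by_cases hL : (cell g x.1 x.2.1 == "L") = true
    · simp only [hL, if_true]
      by_cases h0 : ((x.2.2.foldl (fun occ p => if cell g p.1 p.2 == "#" then occ + 1 else occ) 0 : Int) == 0) = true
      · simp only [h0, if_true]
        exact supp_setCell g0 st.1 h _ _ _ (by rw [hx]; rfl)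
      · simp only [Bool.not_eq_true _ ▸ h0, Bool.false_eq_true, if_false]
        exact h
    · simp only [Bool.not_eq_true _ ▸ hL, Bool.false_eq_true, if_false]
      by_cases h5 : (5 : Int) ≤ x.2.2.foldl (fun occ p => if cell g p.1 p.2 == "#" then occ + 1 else occ) 0
      · simp only [h5, decide_true, if_true]
        exact supp_setCell g0 st.1 h _ _ _ (by rw [hx]; rfl)
      · simp only [h5, decide_false, Bool.false_eq_true, if_false]
        exact h

-- the two stabilization loops agree step for step (same fuel on both sides)
theorem loop_eq (g0 : List (List String)) (nr nc : Int) :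
    ∀ (fuel : Nat) (g : List (List String)), Supp g0 g →
      loopA nr nc fuel g = loopB (seatsB g0 nr nc) fuel g := by
  intro fuel
  induction fuel with
  | zero => intro g _; rfl
  | succ n ih =>
    intro g hs
    obtain ⟨hgrid, hnn, hch⟩ := step_eq g0 g hs nr nc
    have hsupp' : Supp g0 (stepB g (seatsB g0 nr nc)).1 := by
      rw [stepB_eq_fold]
      exact supp_foldl_bodyB g0 g _ (fun x hx => mem_seatsB g0 nr nc x hx) (g, false) hs
    simp only [loopA, loopB]
    by_cases hc : (stepB g (seatsB g0 nr nc)).2 = true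
    · rw [if_pos (hch.mpr hc), if_pos hc, hgrid]
      exact ih _ hsupp'
    · have h2 : ¬ 0 < (stepA nr nc g).2 := fun hlt => hc (hch.mp hlt)
      rw [if_neg h2, if_neg hc, hgrid]

-- ===== VERDICT (by name: the statement is the Claim_ definition above) =====
theorem part2_spec : Claim_equal_part2 := by
  intro seat_grid _dom _pre
  unfold Spec_part2 part2 part2_alt
  have h := loop_eq seat_grid (seat_grid.length : Int) ((seat_grid.headD []).length : Int)
    (2 ^ (seat_grid.length * (seat_grid.headD []).length) + 1) seat_grid (fun i j => rfl)
  simp only [h]
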